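-- pv_equiv track=rewrite | github.com/robquant/adventofcode2023 | 11/run.py | cumulative_rows_and_cols
-- ===== SOURCE A (Python) =====
-- def is_empty_row(field, row):
--     return all(c == '.' for c in field[row])
--
-- def is_empty_col(field, col):
--     return all(line[col] == '.' for line in field)
--
-- def cumulative_rows_and_cols(lines, expansion_factor):
--     n_rows = len(lines)
--     n_cols = len(lines[0])
--     cumulative_rows = {}
--     total_offset = 0
--     for i_row in range(n_rows):
--         if is_empty_row(lines, i_row):
--             total_offset += expansion_factor - 1
--         else:
--             cumulative_rows[i_row] = i_row + total_offset
--     cumulative_cols = {}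
--     total_offset = 0
--     for i_col in range(n_cols):
--         if is_empty_col(lines, i_col):
--             total_offset += expansion_factor - 1
--         else:
--             cumulative_cols[i_col] = i_col + total_offset
--     return cumulative_rows, cumulative_cols
-- ===== SOURCE B (Python) =====
-- def cumulative_rows_and_cols(lines, expansion_factor):
--     n_rows = len(lines)
--     n_cols = len(lines[0])
--     # One pass over all cells: record which rows/cols contain a non-'.' cell.
--     nonempty_rows = set()
--     nonempty_cols = set()
--     for r, line in enumerate(lines):
--         for c, ch in enumerate(line):
--             if ch != '.':
--                 nonempty_rows.add(r)
--                 nonempty_cols.add(c)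
--     cumulative_rows = {}
--     offset = 0
--     for r in range(n_rows):
--         if r in nonempty_rows:
--             cumulative_rows[r] = r + offset
--         else:
--             offset += expansion_factor - 1
--     cumulative_cols = {}
--     offset = 0
--     for c in range(n_cols):
--         if c in nonempty_cols:
--             cumulative_cols[c] = c + offset
--         else:
--             offset += expansion_factor - 1
--     return cumulative_rows, cumulative_cols
-- ===== Notes on version B (the rewrite author's own statement) =====
-- stated objective: alternative
-- what changed: A rescans the grid once per row and once per column with is_empty_row/is_empty_col; B makes a single pass over all cells collecting the sets of non-empty rows and columns, then builds both cumulative maps by set lookup.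
import Mathlib
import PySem

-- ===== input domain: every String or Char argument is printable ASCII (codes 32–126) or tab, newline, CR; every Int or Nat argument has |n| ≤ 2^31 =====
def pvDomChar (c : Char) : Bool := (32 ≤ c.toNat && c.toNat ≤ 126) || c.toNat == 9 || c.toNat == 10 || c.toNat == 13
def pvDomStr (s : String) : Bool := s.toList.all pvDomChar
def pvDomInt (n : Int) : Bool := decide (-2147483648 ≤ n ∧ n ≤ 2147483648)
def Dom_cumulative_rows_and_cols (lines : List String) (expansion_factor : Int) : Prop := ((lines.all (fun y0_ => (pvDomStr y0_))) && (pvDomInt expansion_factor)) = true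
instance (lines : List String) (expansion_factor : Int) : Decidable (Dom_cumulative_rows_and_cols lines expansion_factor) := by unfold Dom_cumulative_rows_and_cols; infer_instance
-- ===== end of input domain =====

-- B replaces A's per-row/per-column rescans by one pass over all cells that collects the
-- sets of non-empty rows and columns, then two lookup passes (same asymptotic cost).

-- ===== PORT A =====
def pvIsEmptyRow (field : List String) (row : Int) : Bool :=
  (PySem.List.pyGetD field row "").toList.all (fun c => c == '.')

-- line[col] raises IndexError in Python when col ≥ len(line); Pre_ excludes exactly the
-- inputs on which that raise is reached, so the '.getD '.'' total form is never observed.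
def pvIsEmptyCol (field : List String) (col : Int) : Bool :=
  field.all (fun line => (PySem.Str.pyGet? line col).getD '.' == '.')

def cumulative_rows_and_cols (lines : List String) (expansion_factor : Int) :
    (List (Int × Int)) × (List (Int × Int)) :=
  let n_rows : Int := lines.length
  let n_cols : Int := PySem.Str.len (PySem.List.pyGetD lines 0 "")
  let rowRes :=
    (PySem.List.pyRange 0 n_rows 1).foldl
      (fun (st : PySem.Dict Int Int × Int) i =>
        if pvIsEmptyRow lines i then (st.1, st.2 + (expansion_factor - 1))
        else (st.1.insert i (i + st.2), st.2))
      (PySem.Dict.empty, 0)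
  let colRes :=
    (PySem.List.pyRange 0 n_cols 1).foldl
      (fun (st : PySem.Dict Int Int × Int) i =>
        if pvIsEmptyCol lines i then (st.1, st.2 + (expansion_factor - 1))
        else (st.1.insert i (i + st.2), st.2))
      (PySem.Dict.empty, 0)
  (rowRes.1.items, colRes.1.items)

-- ===== PORT B =====
-- the single pass over all cells: (set of rows with a non-'.' cell, same for columns)
def pvScanGrid (lines : List String) : PySem.Set Int × PySem.Set Int :=
  (PySem.List.enumerate lines).foldl
    (fun st p =>
      (PySem.List.enumerate p.2.toList).foldl
        (fun (st : PySem.Set Int × PySem.Set Int) q =>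
          if q.2 ≠ '.' then (PySem.Set.add st.1 p.1, PySem.Set.add st.2 q.1) else st)
        st)
    (PySem.Set.empty, PySem.Set.empty)

def cumulative_rows_and_cols_alt (lines : List String) (expansion_factor : Int) :
    (List (Int × Int)) × (List (Int × Int)) :=
  let n_rows : Int := lines.length
  let n_cols : Int := PySem.Str.len (PySem.List.pyGetD lines 0 "")
  let ne := pvScanGrid lines
  let rowRes :=
    (PySem.List.pyRange 0 n_rows 1).foldl
      (fun (st : PySem.Dict Int Int × Int) i =>
        if PySem.Set.contains ne.1 i then (st.1.insert i (i + st.2), st.2)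
        else (st.1, st.2 + (expansion_factor - 1)))
      (PySem.Dict.empty, 0)
  let colRes :=
    (PySem.List.pyRange 0 n_cols 1).foldl
      (fun (st : PySem.Dict Int Int × Int) i =>
        if PySem.Set.contains ne.2 i then (st.1.insert i (i + st.2), st.2)
        else (st.1, st.2 + (expansion_factor - 1)))
      (PySem.Dict.empty, 0)
  (rowRes.1.items, colRes.1.items)

-- ===== PRECONDITION & SPEC =====
-- column scans never hit a too-short line: for every column index c < len(lines[0]), any
-- line shorter than c+1 is preceded by a line with a non-'.' character at column c
def pvColsOk (lines : List String) : Bool :=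
  (List.range (lines.headD "").toList.length).all fun c =>
    (List.range lines.length).all fun k =>
      decide (c < (lines.getD k "").toList.length) ||
      (List.range k).any fun j =>
        decide (c < (lines.getD j "").toList.length) &&
        ((lines.getD j "").toList.getD c '.' != '.')

-- Pre_ excludes exactly the inputs where Python A raises IndexError: the empty list
-- (lines[0]) and ragged grids where a column scan reaches a too-short line before a
-- non-'.' character short-circuits it.
def Pre_cumulative_rows_and_cols (lines : List String) (expansion_factor : Int) : Prop :=
  lines ≠ [] ∧ pvColsOk lines = true
instance (lines : List String) (expansion_factor : Int) : Decidable (Pre_cumulative_rows_and_cols lines expansion_factor) := by unfold Pre_cumulative_rows_and_cols; infer_instance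

def pvWitness_cumulative_rows_and_cols : List String × Int := (["#.", ".."], 2)

def Spec_cumulative_rows_and_cols (lines : List String) (expansion_factor : Int) (out : (List (Int × Int)) × (List (Int × Int))) : Prop := out = cumulative_rows_and_cols_alt lines expansion_factor
instance (lines : List String) (expansion_factor : Int) (out : (List (Int × Int)) × (List (Int × Int))) : Decidable (Spec_cumulative_rows_and_cols lines expansion_factor out) := by unfold Spec_cumulative_rows_and_cols; infer_instance

-- ===== CLAIM (what is proved, stated in full; the proofs are below) =====
def Claim_equal_cumulative_rows_and_cols : Prop := ∀ (lines : List String) (expansion_factor : Int), Dom_cumulative_rows_and_cols lines expansion_factor → Pre_cumulative_rows_and_cols lines expansion_factor → Spec_cumulative_rows_and_cols lines expansion_factor (cumulative_rows_and_cols lines expansion_factor)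
-- ===== LEMMAS AND PROOFS =====

theorem pvInner_mem (r : Int) (qs : List (Int × Char)) (st : PySem.Set Int × PySem.Set Int) :
    (∀ x : Int, x ∈ (qs.foldl (fun (st : PySem.Set Int × PySem.Set Int) q =>
        if q.2 ≠ '.' then (PySem.Set.add st.1 r, PySem.Set.add st.2 q.1) else st) st).1 ↔
      x ∈ st.1 ∨ (x = r ∧ ∃ q ∈ qs, q.2 ≠ '.')) ∧
    (∀ x : Int, x ∈ (qs.foldl (fun (st : PySem.Set Int × PySem.Set Int) q =>
        if q.2 ≠ '.' then (PySem.Set.add st.1 r, PySem.Set.add st.2 q.1) else st) st).2 ↔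
      x ∈ st.2 ∨ ∃ q ∈ qs, q.2 ≠ '.' ∧ x = q.1) := by
  induction qs generalizing st with
  | nil => simp
  | cons q qs ih =>
    refine ⟨fun x => ?_, fun x => ?_⟩ <;>
      simp only [List.foldl_cons]
    · by_cases h : q.2 ≠ '.'
      · rw [if_pos h, (ih _).1]
        simp only [PySem.Set.mem_add, List.mem_cons]
        constructor
        · rintro ((hx | rfl) | ⟨rfl, q', hq', hne⟩)
          · exact Or.inl hx
          · exact Or.inr ⟨rfl, q, Or.inl rfl, h⟩
          · exact Or.inr ⟨rfl, q', Or.inr hq', hne⟩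
        · rintro (hx | ⟨rfl, q', hq', hne⟩)
          · exact Or.inl (Or.inl hx)
          · exact Or.inl (Or.inr rfl)
      · rw [if_neg h, (ih _).1]
        simp only [not_not] at h
        simp only [List.mem_cons]
        constructor
        · rintro (hx | ⟨rfl, q', hq', hne⟩)
          · exact Or.inl hx
          · exact Or.inr ⟨rfl, q', Or.inr hq', hne⟩
        · rintro (hx | ⟨rfl, q', (rfl | hq'), hne⟩)
          · exact Or.inl hx
          · exact absurd h hne
          · exact Or.inr ⟨rfl, q', hq', hne⟩
    · by_cases h : q.2 ≠ '.'
      · rw [if_pos h, (ih _).2]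
        simp only [PySem.Set.mem_add, List.mem_cons]
        constructor
        · rintro ((hx | rfl) | ⟨q', hq', hne, rfl⟩)
          · exact Or.inl hx
          · exact Or.inr ⟨q, Or.inl rfl, h, rfl⟩
          · exact Or.inr ⟨q', Or.inr hq', hne, rfl⟩
        · rintro (hx | ⟨q', (rfl | hq'), hne, rfl⟩)
          · exact Or.inl (Or.inl hx)
          · exact Or.inl (Or.inr rfl)
          · exact Or.inr ⟨q', hq', hne, rfl⟩
      · rw [if_neg h, (ih _).2]
        simp only [not_not] at h
        simp only [List.mem_cons]
        constructor
        · rintro (hx | ⟨q', hq', hne, rfl⟩)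
          · exact Or.inl hx
          · exact Or.inr ⟨q', Or.inr hq', hne, rfl⟩
        · rintro (hx | ⟨q', (rfl | hq'), hne, rfl⟩)
          · exact Or.inl hx
          · exact absurd h hne
          · exact Or.inr ⟨q', hq', hne, rfl⟩

theorem pvScan_mem (ps : List (Int × String)) (st : PySem.Set Int × PySem.Set Int) :
    (∀ x : Int, x ∈ (ps.foldl (fun st p =>
        (PySem.List.enumerate p.2.toList).foldl
          (fun (st : PySem.Set Int × PySem.Set Int) q =>
            if q.2 ≠ '.' then (PySem.Set.add st.1 p.1, PySem.Set.add st.2 q.1) else st) st) st).1 ↔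
      x ∈ st.1 ∨ ∃ p ∈ ps, x = p.1 ∧ ∃ q ∈ PySem.List.enumerate p.2.toList, q.2 ≠ '.') ∧
    (∀ x : Int, x ∈ (ps.foldl (fun st p =>
        (PySem.List.enumerate p.2.toList).foldl
          (fun (st : PySem.Set Int × PySem.Set Int) q =>
            if q.2 ≠ '.' then (PySem.Set.add st.1 p.1, PySem.Set.add st.2 q.1) else st) st) st).2 ↔
      x ∈ st.2 ∨ ∃ p ∈ ps, ∃ q ∈ PySem.List.enumerate p.2.toList, q.2 ≠ '.' ∧ x = q.1) := by
  induction ps generalizing st with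
  | nil => simp
  | cons p ps ih =>
    constructor <;> intro x <;>
      · simp only [List.foldl_cons]
        rcases ih ((PySem.List.enumerate p.2.toList).foldl
          (fun (st : PySem.Set Int × PySem.Set Int) q =>
            if q.2 ≠ '.' then (PySem.Set.add st.1 p.1, PySem.Set.add st.2 q.1) else st) st) with ⟨h1, h2⟩
        rcases pvInner_mem p.1 (PySem.List.enumerate p.2.toList) st with ⟨g1, g2⟩
        first
          | rw [h1, g1]; simp only [List.mem_cons]
            constructor
            · rintro ((hx | ⟨rfl, hq⟩) | ⟨p', hp', rest⟩)
              · tauto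
              · exact Or.inr ⟨p, Or.inl rfl, rfl, hq⟩
              · exact Or.inr ⟨p', Or.inr hp', rest⟩
            · rintro (hx | ⟨p', (rfl | hp'), rest⟩)
              · tauto
              · exact Or.inl (Or.inr rest)
              · exact Or.inr ⟨p', hp', rest⟩
          | rw [h2, g2]; simp only [List.mem_cons]
            constructor
            · rintro ((hx | hq) | ⟨p', hp', rest⟩)
              · tauto
              · exact Or.inr ⟨p, Or.inl rfl, hq⟩
              · exact Or.inr ⟨p', Or.inr hp', rest⟩
            · rintro (hx | ⟨p', (rfl | hp'), rest⟩)
              · tauto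
              · exact Or.inl (Or.inr rest)
              · exact Or.inr ⟨p', hp', rest⟩

theorem pvScanGrid_mem_fst (lines : List String) (x : Int) :
    x ∈ (pvScanGrid lines).1 ↔
      ∃ p ∈ PySem.List.enumerate lines, x = p.1 ∧ ∃ q ∈ PySem.List.enumerate p.2.toList, q.2 ≠ '.' := by
  have h := (pvScan_mem (PySem.List.enumerate lines) (PySem.Set.empty, PySem.Set.empty)).1 x
  simpa [pvScanGrid, PySem.Set.empty] using h

theorem pvScanGrid_mem_snd (lines : List String) (x : Int) :
    x ∈ (pvScanGrid lines).2 ↔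
      ∃ p ∈ PySem.List.enumerate lines, ∃ q ∈ PySem.List.enumerate p.2.toList, q.2 ≠ '.' ∧ x = q.1 := by
  have h := (pvScan_mem (PySem.List.enumerate lines) (PySem.Set.empty, PySem.Set.empty)).2 x
  simpa [pvScanGrid, PySem.Set.empty] using h

theorem pvRow_iff (lines : List String) (i : Int) (h0 : 0 ≤ i) (hn : i < (lines.length : Int)) :
    i ∈ (pvScanGrid lines).1 ↔ ∃ c ∈ lines[i.toNat]!.toList, c ≠ '.' := by
  have hlt : i.toNat < lines.length := by omega
  rw [pvScanGrid_mem_fst]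
  constructor
  · rintro ⟨p, hp, hxeq, q, hq, hne⟩
    rcases (PySem.List.mem_enumerate_iff _ _ _).1 hp with ⟨k, hk, rfl⟩
    rcases (PySem.List.mem_enumerate_iff _ _ _).1 hq with ⟨m, hm, rfl⟩
    have hk' : i.toNat = k := by simp at hxeq; omega
    refine ⟨lines[k].toList[m], ?_, hne⟩
    rw [getElem!_pos lines i.toNat hlt]
    subst hk'
    exact List.getElem_mem hm
  · rintro ⟨c, hc, hne⟩
    rw [getElem!_pos lines i.toNat hlt] at hc
    rcases List.mem_iff_getElem.1 hc with ⟨m, hm, rfl⟩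
    refine ⟨(0 + (i.toNat : Int), lines[i.toNat]),
      (PySem.List.mem_enumerate_iff _ _ _).2 ⟨i.toNat, hlt, rfl⟩, by omega,
      (0 + (m : Int), lines[i.toNat].toList[m]),
      (PySem.List.mem_enumerate_iff _ _ _).2 ⟨m, hm, rfl⟩, hne⟩

theorem pvCol_iff (lines : List String) (i : Int) :
    i ∈ (pvScanGrid lines).2 ↔
      ∃ k, ∃ hk : k < lines.length, ∃ m, ∃ hm : m < lines[k].toList.length,
        lines[k].toList[m] ≠ '.' ∧ i = (m : Int) := by
  rw [pvScanGrid_mem_snd]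
  constructor
  · rintro ⟨p, hp, q, hq, hne, hxeq⟩
    rcases (PySem.List.mem_enumerate_iff _ _ _).1 hp with ⟨k, hk, rfl⟩
    rcases (PySem.List.mem_enumerate_iff _ _ _).1 hq with ⟨m, hm, rfl⟩
    exact ⟨k, hk, m, hm, hne, by simpa using hxeq⟩
  · rintro ⟨k, hk, m, hm, hne, rfl⟩
    exact ⟨(0 + (k : Int), lines[k]), (PySem.List.mem_enumerate_iff _ _ _).2 ⟨k, hk, rfl⟩,
      (0 + (m : Int), lines[k].toList[m]), (PySem.List.mem_enumerate_iff _ _ _).2 ⟨m, hm, rfl⟩,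
      hne, by omega⟩

theorem pvColsOk_spec (lines : List String) (hcols : pvColsOk lines = true) :
    ∀ c < (lines.headD "").toList.length, ∀ k < lines.length,
      (lines.getD k "").toList.length ≤ c →
      ∃ j < k, c < (lines.getD j "").toList.length ∧ (lines.getD j "").toList.getD c '.' ≠ '.' := by
  intro c hc k hk hlen
  simp only [pvColsOk, List.all_eq_true, List.mem_range] at hcols
  rcases Bool.or_eq_true_iff.1 (hcols c hc k hk) with h | h
  · simp only [decide_eq_true_eq] at h; omega
  · rcases List.any_eq_true.1 h with ⟨j, hj, hj2⟩
    rcases Bool.and_eq_true_iff.1 hj2 with ⟨h1, h2⟩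
    exact ⟨j, List.mem_range.1 hj, by simpa using h1, by simpa using h2⟩

theorem pvRow_test (lines : List String) (i : Int) (h0 : 0 ≤ i) (hn : i < (lines.length : Int)) :
    pvIsEmptyRow lines i = !(PySem.Set.contains (pvScanGrid lines).1 i) := by
  have hlt : i.toNat < lines.length := by omega
  have hget : PySem.List.pyGetD lines i "" = lines[i.toNat] :=
    PySem.List.pyGetD_eq_getElem lines "" h0 (by exact_mod_cast hn)
  by_cases hex : ∃ c ∈ lines[i.toNat]!.toList, c ≠ '.'
  · have hc : PySem.Set.contains (pvScanGrid lines).1 i = true :=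
      (PySem.Set.contains_iff _ _).2 ((pvRow_iff lines i h0 hn).2 hex)
    rw [hc, Bool.not_true, pvIsEmptyRow, hget]
    rw [getElem!_pos lines i.toNat hlt] at hex
    rcases hex with ⟨c, hcmem, hne⟩
    exact List.all_eq_false.2 ⟨c, hcmem, by simpa using hne⟩
  · have hc : PySem.Set.contains (pvScanGrid lines).1 i = false :=
      Bool.eq_false_iff.2 (fun h => hex ((pvRow_iff lines i h0 hn).1 ((PySem.Set.contains_iff _ _).1 h)))
    rw [hc, Bool.not_false, pvIsEmptyRow, hget, List.all_eq_true]
    intro c hcmem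
    by_contra hne
    exact hex ⟨c, by rwa [getElem!_pos lines i.toNat hlt], by simpa using hne⟩

theorem pvCol_test (lines : List String) (hcols : pvColsOk lines = true) (i : Int)
    (h0 : 0 ≤ i) (hn : i < ((lines.headD "").toList.length : Int)) :
    pvIsEmptyCol lines i = !(PySem.Set.contains (pvScanGrid lines).2 i) := by
  by_cases hex : i ∈ (pvScanGrid lines).2
  · have hc : PySem.Set.contains (pvScanGrid lines).2 i = true := (PySem.Set.contains_iff _ _).2 hex
    rw [hc, Bool.not_true, pvIsEmptyCol]
    rcases (pvCol_iff lines i).1 hex with ⟨k, hk, m, hm, hne, rfl⟩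
    refine List.all_eq_false.2 ⟨lines[k], List.getElem_mem hk, ?_⟩
    rw [PySem.Str.pyGet?_natCast, List.getElem?_eq_getElem hm]
    simpa using hne
  · have hc : PySem.Set.contains (pvScanGrid lines).2 i = false := Bool.eq_false_iff.2 (fun h => hex ((PySem.Set.contains_iff _ _).1 h))
    rw [hc, Bool.not_false, pvIsEmptyCol, List.all_eq_true]
    intro line hline
    rcases List.mem_iff_getElem.1 hline with ⟨k, hk, rfl⟩
    by_cases hlen : i.toNat < lines[k].toList.length
    · have hi : i = ((i.toNat : Nat) : Int) := by omega
      rw [hi, PySem.Str.pyGet?_natCast, List.getElem?_eq_getElem hlen]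
      by_contra hne
      exact hex ((pvCol_iff lines i).2 ⟨k, hk, i.toNat, hlen, by simpa using hne, hi⟩)
    · exfalso
      have hgd : lines.getD k "" = lines[k] := by
        rw [List.getD_eq_getElem?_getD, List.getElem?_eq_getElem hk]; rfl
      have hlen' : (lines.getD k "").toList.length ≤ i.toNat := by rw [hgd]; omega
      rcases pvColsOk_spec lines hcols i.toNat (by omega) k hk hlen' with ⟨j, hj, hjlen, hjne⟩
      have hgj : lines.getD j "" = lines[j] := by
        rw [List.getD_eq_getElem?_getD, List.getElem?_eq_getElem (by omega : j < lines.length)]; rfl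
      rw [hgj] at hjlen hjne
      rw [List.getD_eq_getElem?_getD, List.getElem?_eq_getElem hjlen] at hjne
      exact hex ((pvCol_iff lines i).2 ⟨j, by omega, i.toNat, hjlen, by simpa using hjne, by omega⟩)

theorem pvHead_eq (lines : List String) : PySem.List.pyGetD lines 0 "" = lines.headD "" := by
  cases lines <;> simp [PySem.List.pyGetD_zero]

-- ===== VERDICT (by name: the statement is the Claim_ definition above) =====
theorem cumulative_rows_and_cols_spec : Claim_equal_cumulative_rows_and_cols := by
  intro lines expansion_factor _dom hpre
  rcases hpre with ⟨hne, hcols⟩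
  unfold Spec_cumulative_rows_and_cols cumulative_rows_and_cols cumulative_rows_and_cols_alt
  have hrow : (PySem.List.pyRange 0 (lines.length : Int) 1).foldl
      (fun (st : PySem.Dict Int Int × Int) i =>
        if pvIsEmptyRow lines i then (st.1, st.2 + (expansion_factor - 1))
        else (st.1.insert i (i + st.2), st.2))
      (PySem.Dict.empty, 0) =
    (PySem.List.pyRange 0 (lines.length : Int) 1).foldl
      (fun (st : PySem.Dict Int Int × Int) i =>
        if PySem.Set.contains (pvScanGrid lines).1 i then (st.1.insert i (i + st.2), st.2)
        else (st.1, st.2 + (expansion_factor - 1)))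
      (PySem.Dict.empty, 0) := by
    refine PySem.List.foldl_congr_mem _ _ _ _ (fun acc x hx => ?_)
    rcases (PySem.List.mem_pyRange_one).1 hx with ⟨hx0, hxn⟩
    rw [pvRow_test lines x hx0 hxn]
    cases PySem.Set.contains (pvScanGrid lines).1 x <;> simp
  have hcol : (PySem.List.pyRange 0 (PySem.Str.len (PySem.List.pyGetD lines 0 "")) 1).foldl
      (fun (st : PySem.Dict Int Int × Int) i =>
        if pvIsEmptyCol lines i then (st.1, st.2 + (expansion_factor - 1))
        else (st.1.insert i (i + st.2), st.2))
      (PySem.Dict.empty, 0) =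
    (PySem.List.pyRange 0 (PySem.Str.len (PySem.List.pyGetD lines 0 "")) 1).foldl
      (fun (st : PySem.Dict Int Int × Int) i =>
        if PySem.Set.contains (pvScanGrid lines).2 i then (st.1.insert i (i + st.2), st.2)
        else (st.1, st.2 + (expansion_factor - 1)))
      (PySem.Dict.empty, 0) := by
    refine PySem.List.foldl_congr_mem _ _ _ _ (fun acc x hx => ?_)
    rcases (PySem.List.mem_pyRange_one).1 hx with ⟨hx0, hxn⟩
    rw [pvHead_eq, PySem.Str.len_eq] at hxn
    rw [pvCol_test lines hcols x hx0 (by simpa using hxn)]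
    cases PySem.Set.contains (pvScanGrid lines).2 x <;> simp
  simp only []
  rw [hrow, hcol]
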